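-- pv_equiv track=rewrite | github.com/bahgaat/cs61a | practice problems/practice.py | sabacc_winner
-- ===== SOURCE A (Python) =====
-- def sabacc_winner(cards, player0, player1):
--     """Returns the winner of a game of Sabacc if players can take 1 or 2 cards
--     per turn and both players play optimally. Assume that it is player0's turn.
--     >>> sabacc_winner(0, 'Han', 'Lando')
--     'Han'
--     >>> sabacc_winner(1, 'Han', 'Lando')
--     'Lando'
--     >>> sabacc_winner(2, 'Han', 'Lando')
--     'Han'
--     >>> sabacc_winner(3, 'Han', 'Lando')
--     'Han'
--     >>> sabacc_winner(4, 'Han', 'Lando')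
--     'Lando'
--     """
--     if cards == 0:
--         return player0
--     if cards == 1:
--         return player1
--     one_card = sabacc_winner(cards - 1, player1, player0)
--     two_card = sabacc_winner(cards - 2, player1, player0)
--     if one_card == player0 or two_card == player0:
--         return player0
--     return player1
-- ===== SOURCE B (Python) =====
-- def sabacc_winner(cards, player0, player1):
--     return player1 if cards % 3 == 1 else player0
-- ===== Notes on version B (the rewrite author's own statement) =====
-- stated objective: simpler
-- what changed: Replaced the exponential two-branch game-tree recursion by the closed form: player1 wins iff cards % 3 == 1, else player0.
import Mathlib
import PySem

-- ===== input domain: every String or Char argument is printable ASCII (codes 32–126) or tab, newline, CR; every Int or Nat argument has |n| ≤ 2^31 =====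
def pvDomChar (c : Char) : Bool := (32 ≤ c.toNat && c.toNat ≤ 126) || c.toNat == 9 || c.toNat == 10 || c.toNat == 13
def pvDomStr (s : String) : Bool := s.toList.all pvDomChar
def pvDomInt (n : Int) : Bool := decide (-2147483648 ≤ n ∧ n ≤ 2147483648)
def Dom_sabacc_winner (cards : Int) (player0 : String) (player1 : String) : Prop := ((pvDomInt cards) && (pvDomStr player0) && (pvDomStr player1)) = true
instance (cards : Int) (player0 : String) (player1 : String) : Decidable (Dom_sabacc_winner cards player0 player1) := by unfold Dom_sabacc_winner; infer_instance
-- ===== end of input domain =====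

-- B replaces A's two-branch game-tree recursion by the closed form cards % 3 (simpler; a timing run could not confirm a ratio because A times out on large inputs).
-- ===== PORT A =====
-- Python A recurses on cards; for cards ≥ 0 it strictly decreases to the base cases,
-- so the literal port recurses on cards.toNat (exact for cards ≥ 0; A raises on cards < 0, excluded by Pre_).
def sabaccGoA : Nat → String → String → String
  | 0, p0, _ => p0
  | 1, _, p1 => p1
  | (n+2), p0, p1 =>
    let one_card := sabaccGoA (n+1) p1 p0
    let two_card := sabaccGoA n p1 p0
    if one_card == p0 || two_card == p0 then p0 else p1

def sabacc_winner (cards : Int) (player0 : String) (player1 : String) : String :=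
  sabaccGoA cards.toNat player0 player1

-- ===== PORT B =====
def sabacc_winner_alt (cards : Int) (player0 : String) (player1 : String) : String :=
  if PySem.Int.mod cards 3 == 1 then player1 else player0

-- ===== PRECONDITION & SPEC =====
-- Pre_ excludes cards < 0, on which Python A raises RecursionError.
def Pre_sabacc_winner (cards : Int) (player0 : String) (player1 : String) : Prop := 0 ≤ cards
instance (cards : Int) (player0 : String) (player1 : String) : Decidable (Pre_sabacc_winner cards player0 player1) := by unfold Pre_sabacc_winner; infer_instance
def pvWitness_sabacc_winner : Int × String × String := (4, "Han", "Lando")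


def Spec_sabacc_winner (cards : Int) (player0 : String) (player1 : String) (out : String) : Prop := out = sabacc_winner_alt cards player0 player1
instance (cards : Int) (player0 : String) (player1 : String) (out : String) : Decidable (Spec_sabacc_winner cards player0 player1 out) := by unfold Spec_sabacc_winner; infer_instance

-- ===== CLAIM (what is proved, stated in full; the proofs are below) =====
def Claim_equal_sabacc_winner : Prop := ∀ (cards : Int) (player0 : String) (player1 : String), Dom_sabacc_winner cards player0 player1 → Pre_sabacc_winner cards player0 player1 → Spec_sabacc_winner cards player0 player1 (sabacc_winner cards player0 player1)

-- ===== LEMMAS AND PROOFS =====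
theorem sabaccGoA_closed (n : Nat) : ∀ (p0 p1 : String), sabaccGoA n p0 p1 = if n % 3 = 1 then p1 else p0 := by
  induction n using Nat.strong_induction_on with
  | _ n ih =>
    match n with
    | 0 => intro p0 p1; simp [sabaccGoA]
    | 1 => intro p0 p1; simp [sabaccGoA]
    | (m+2) =>
      intro p0 p1
      rw [sabaccGoA]
      simp only [ih (m+1) (by omega) p1 p0, ih m (by omega) p1 p0]
      by_cases hpq : p0 = p1
      · subst hpq; split_ifs <;> simp
      · have h0 : (p1 : String) ≠ p0 := fun h => hpq h.symm
        have h3 : m % 3 = 0 ∨ m % 3 = 1 ∨ m % 3 = 2 := by omega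
        rcases h3 with h | h | h
        · have e1 : (m+1) % 3 = 1 := by omega
          have e2 : (m+2) % 3 = 2 := by omega
          simp [e1, e2]
        · have e2 : (m+2) % 3 = 0 := by omega
          simp [h, e2]
        · have e1 : (m+1) % 3 = 0 := by omega
          have e2 : (m+2) % 3 = 1 := by omega
          simp [h, e1, e2, h0, hpq]

theorem sabacc_winner_spec : Claim_equal_sabacc_winner := by
  intro cards p0 p1 _ hpre
  unfold Spec_sabacc_winner sabacc_winner sabacc_winner_alt
  rw [sabaccGoA_closed]
  unfold Pre_sabacc_winner at hpre
  have hm : PySem.Int.mod cards 3 = (cards.toNat : Int) % 3 := by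
    simp [PySem.Int.mod]
    rw [Int.fmod_eq_emod]
    omega
  have h3 : cards.toNat % 3 = 0 ∨ cards.toNat % 3 = 1 ∨ cards.toNat % 3 = 2 := by omega
  rcases h3 with h | h | h <;>
    simp [hm, h] <;> omega
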